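-- pv_equiv track=rewrite | github.com/AiZhanghan/Leetcode | mooc/查找问题/1319. 连通网络的操作次数.py | makeConnected
-- ===== SOURCE A (Python) =====
-- def makeConnected(n, connections):
--     # 网线数量
--     line_num = len(connections)
--     # 网线数量不足
--     if line_num < n - 1:
--         return -1
--     # 建立并查集
--     union_find_set = UnionFindSet(n)
--     for connection in connections:
--         root1 = union_find_set.find(connection[0])
--         root2 = union_find_set.find(connection[1])
--         if root1 != root2:
--             union_find_set.union(root1, root2)
--     # 确定连通分量数目
--     counter = 0
--     for i in range(n):
--         if union_find_set.s[i] < 0: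
--             counter += 1
--
--     return counter - 1
--
-- class UnionFindSet:
--     def __init__(self, max_size):
--         self.s = [-1 for _ in range(max_size)]
--
--     def find(self, x):
--         """查找元素，返回集合根节点"""
--         if self.s[x] < 0:
--             return x
--         else:
--             # 路径压缩
--             self.s[x] = self.find(self.s[x])
--             return self.s[x]
--
--     def union(self, root1, root2):
--         if self.s[root2] < self.s[root1]:
--             self.s[root2] += self.s[root1]
--             self.s[root1] = root2
--         else:
--             self.s[root1] += self.s[root2]
--             self.s[root2] = root1
-- ===== SOURCE B (Python) =====
-- def makeConnected(n, connections):
--     # weighted quick-find: a flat label array plus a members list per label,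
--     # always relabelling the smaller class (no trees, no recursion)
--     if len(connections) < n - 1:
--         return -1
--     comp = list(range(n))
--     members = {i: [i] for i in range(n)}
--     for conn in connections:
--         a = comp[conn[0]]
--         b = comp[conn[1]]
--         if a != b:
--             if len(members[a]) < len(members[b]):
--                 a, b = b, a
--             for x in members[b]:
--                 comp[x] = a
--             members[a].extend(members[b])
--             del members[b]
--     return len(set(comp)) - 1
-- ===== Notes on version B (the rewrite author's own statement) =====
-- stated objective: alternative
-- what changed: Replaces A's recursive path-compressing union-find forest by weighted quick-find: a flat label array plus a per-label member list, relabelling the smaller class on each merge and counting distinct labels; Pre_ excludes connections that are too short or have an endpoint outside [0,n) (unless the cable-count guard fires first), where A raises IndexError/RecursionError or returns accidental values from Python's negative-index wraparound mixing wrapped and unwrapped node names.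
-- outside the precondition, e.g. on makeConnected(2, [[1, -1]]): A returns 0, B returns 1
import Mathlib
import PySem

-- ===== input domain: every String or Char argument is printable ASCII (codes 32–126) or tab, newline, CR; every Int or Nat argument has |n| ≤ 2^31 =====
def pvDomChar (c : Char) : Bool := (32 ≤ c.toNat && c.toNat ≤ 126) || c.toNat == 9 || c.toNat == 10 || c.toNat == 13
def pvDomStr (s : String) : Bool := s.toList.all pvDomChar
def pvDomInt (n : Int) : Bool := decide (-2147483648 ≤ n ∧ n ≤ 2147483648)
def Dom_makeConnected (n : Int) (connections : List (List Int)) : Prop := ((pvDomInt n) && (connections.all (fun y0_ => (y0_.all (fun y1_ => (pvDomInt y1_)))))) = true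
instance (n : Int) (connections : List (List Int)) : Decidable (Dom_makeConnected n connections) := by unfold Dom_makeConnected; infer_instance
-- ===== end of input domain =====

-- B replaces A's recursive path-compressing union-find forest by weighted quick-find (a flat
-- label array plus per-label member lists, always relabelling the smaller class): an
-- alternative algorithm of comparable cost, with no trees and no recursion.

-- ===== PORT A =====
-- UnionFindSet.find with path compression; the Nat fuel (called with s.length + 1) is only a
-- structural-recursion guard — on every input admitted by Pre_ it is proved never to run out
def pvFind : Nat → List Int → Int → List Int × Int
  | 0, s, x => (s, x)
  | fuel+1, s, x =>
    let v := PySem.List.pyGetD s x 0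
    if v < 0 then (s, x)
    else
      let p := pvFind fuel s v
      (PySem.List.pySetD p.1 x p.2, p.2)

-- UnionFindSet.union
def pvUnion (s : List Int) (root1 root2 : Int) : List Int :=
  if PySem.List.pyGetD s root2 0 < PySem.List.pyGetD s root1 0 then
    PySem.List.pySetD (PySem.List.pySetD s root2 (PySem.List.pyGetD s root2 0 + PySem.List.pyGetD s root1 0)) root1 root2
  else
    PySem.List.pySetD (PySem.List.pySetD s root1 (PySem.List.pyGetD s root1 0 + PySem.List.pyGetD s root2 0)) root2 root1

-- body of A's 'for connection in connections' loop
def pvLoopA (s : List Int) (c : List Int) : List Int :=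
  let p := pvFind (s.length + 1) s (PySem.List.pyGetD c 0 0)
  let q := pvFind (p.1.length + 1) p.1 (PySem.List.pyGetD c 1 0)
  if p.2 ≠ q.2 then pvUnion q.1 p.2 q.2 else q.1

def makeConnected (n : Int) (connections : List (List Int)) : Int :=
  let lineNum : Int := connections.length
  if lineNum < n - 1 then -1
  else
    let s := connections.foldl pvLoopA ((List.range n.toNat).map (fun _ => (-1 : Int)))
    ((PySem.List.pyRange 0 n 1).foldl (fun acc i => if PySem.List.pyGetD s i 0 < 0 then acc + 1 else acc) (0 : Int)) - 1

-- ===== PORT B =====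
-- 'for x in members[b]: comp[x] = a'
def pvRelabel (mb : List Int) (a : Int) (comp : List Int) : List Int :=
  mb.foldl (fun c x => PySem.List.pySetD c x a) comp

-- body of B's 'for conn in connections' loop
def pvStepB (st : List Int × PySem.Dict Int (List Int)) (conn : List Int) : List Int × PySem.Dict Int (List Int) :=
  let a0 := PySem.List.pyGetD st.1 (PySem.List.pyGetD conn 0 0) 0
  let b0 := PySem.List.pyGetD st.1 (PySem.List.pyGetD conn 1 0) 0
  if a0 ≠ b0 then
    let ab := if (st.2.getD a0 []).length < (st.2.getD b0 []).length then (b0, a0) else (a0, b0)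
    let mb := st.2.getD ab.2 []
    (pvRelabel mb ab.1 st.1, (st.2.insert ab.1 (st.2.getD ab.1 [] ++ mb)).erase ab.2)
  else st

def makeConnected_alt (n : Int) (connections : List (List Int)) : Int :=
  if (connections.length : Int) < n - 1 then -1
  else
    let st := connections.foldl pvStepB
      (PySem.List.pyRange 0 n 1,
       (PySem.List.pyRange 0 n 1).foldl (fun d i => d.insert i [i]) (PySem.Dict.mk []))
    ((PySem.Set.ofList st.1).length : Int) - 1

-- ===== PRECONDITION & SPEC =====
-- Pre_ excludes connections that are too short or have an endpoint outside [0, n) (unless the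
-- cable-count guard returns -1 first): there A raises IndexError or RecursionError, or returns
-- an accidental value produced by Python's negative-index wraparound mixing wrapped and
-- unwrapped node names.
def Pre_makeConnected (n : Int) (connections : List (List Int)) : Prop :=
  (connections.length : Int) < n - 1 ∨
  ∀ c ∈ connections, 2 ≤ c.length ∧ 0 ≤ c.getD 0 0 ∧ c.getD 0 0 < n ∧ 0 ≤ c.getD 1 0 ∧ c.getD 1 0 < n

instance (n : Int) (connections : List (List Int)) : Decidable (Pre_makeConnected n connections) := by
  unfold Pre_makeConnected; infer_instance

def pvWitness_makeConnected : Int × List (List Int) := (4, [[0, 1], [1, 2], [2, 0], [0, 3]])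

def Spec_makeConnected (n : Int) (connections : List (List Int)) (out : Int) : Prop := out = makeConnected_alt n connections
instance (n : Int) (connections : List (List Int)) (out : Int) : Decidable (Spec_makeConnected n connections out) := by unfold Spec_makeConnected; infer_instance

-- ===== CLAIM (what is proved, stated in full; the proofs are below) =====
def Claim_equal_makeConnected : Prop := ∀ (n : Int) (connections : List (List Int)), Dom_makeConnected n connections → Pre_makeConnected n connections → Spec_makeConnected n connections (makeConnected n connections)

-- ===== LEMMAS AND PROOFS =====

-- root chasing in A's parent array, without compression (proof-side description of find)
def rootGo (s : List Int) : Nat → Nat → Option Nat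
  | 0, _ => none
  | f+1, x => if s.getD x 0 < 0 then some x else rootGo s (f) (s.getD x 0).toNat

def Rooted (s : List Int) (x r : Nat) : Prop := ∃ f, rootGo s f x = some r

theorem rootGo_mono {s : List Int} {f g x r : Nat} (h : rootGo s f x = some r) (hfg : f ≤ g) :
    rootGo s g x = some r := by
  induction f generalizing x g with
  | zero => simp [rootGo] at h
  | succ f ih =>
    cases g with
    | zero => omega
    | succ g =>
      by_cases hx : s.getD x 0 < 0
      · simp only [rootGo] at h ⊢; rw [if_pos hx] at h ⊢; exact h
      · simp only [rootGo] at h ⊢; rw [if_neg hx] at h ⊢; exact ih h (by omega)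

theorem rooted_unique {s : List Int} {x r r' : Nat} (h : Rooted s x r) (h' : Rooted s x r') : r = r' := by
  obtain ⟨f, hf⟩ := h; obtain ⟨g, hg⟩ := h'
  rcases le_total f g with hle | hle
  · have := rootGo_mono hf hle; rw [this] at hg; exact (Option.some_inj.mp hg).symm ▸ rfl
  · have := rootGo_mono hg hle; rw [this] at hf; exact (Option.some_inj.mp hf).symm

theorem rootGo_root {s : List Int} {f x r : Nat} (h : rootGo s f x = some r) : s.getD r 0 < 0 := by
  induction f generalizing x with
  | zero => simp [rootGo] at h
  | succ f ih =>
    by_cases hx : s.getD x 0 < 0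
    · simp only [rootGo] at h; rw [if_pos hx] at h; cases h; exact hx
    · simp only [rootGo] at h; rw [if_neg hx] at h; exact ih h

theorem rooted_self {s : List Int} {r : Nat} (h : s.getD r 0 < 0) : Rooted s r r :=
  ⟨1, by simp only [rootGo]; rw [if_pos h]⟩

theorem rootGo_lt {s : List Int} (hr : ∀ y, y < s.length → 0 ≤ s.getD y 0 → (s.getD y 0).toNat < s.length)
    {f x r : Nat} (hx : x < s.length) (h : rootGo s f x = some r) : r < s.length := by
  induction f generalizing x with
  | zero => simp [rootGo] at h
  | succ f ih =>
    by_cases hx' : s.getD x 0 < 0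
    · simp only [rootGo] at h; rw [if_pos hx'] at h; cases h; exact hx
    · simp only [rootGo] at h; rw [if_neg hx'] at h; exact ih (hr x hx (by omega)) h

theorem getD_set (xs : List Int) (i : Nat) (v : Int) (y : Nat) :
    (xs.set i v).getD y 0 = if i = y ∧ i < xs.length then v else xs.getD y 0 := by
  by_cases h : i = y ∧ i < xs.length
  · obtain ⟨rfl, h2⟩ := h; simp [List.getD, h2]
  · rw [if_neg h]
    by_cases hy : i = y
    · subst hy
      have hno : ¬ i < xs.length := by tauto
      simp [List.getD]
      rw [List.getElem?_eq_none (by simpa using hno), List.getElem?_eq_none (by omega)]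
    · simp [List.getD, hy]

theorem pvFind_spec {s : List Int}
    (hr : ∀ y, y < s.length → 0 ≤ s.getD y 0 → (s.getD y 0).toNat < s.length) :
    ∀ (f : Nat) (x r : Nat), x < s.length → rootGo s f x = some r →
    (pvFind f s (x : Int)).2 = (r : Int) ∧
    (pvFind f s (x : Int)).1.length = s.length ∧
    (∀ y, (pvFind f s (x : Int)).1.getD y 0 = s.getD y 0 ∨
      (0 ≤ s.getD y 0 ∧ ∃ q, Rooted s y q ∧ q < s.length ∧ (pvFind f s (x : Int)).1.getD y 0 = (q : Int))) := by
  intro f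
  induction f with
  | zero => intro x r _ h; simp [rootGo] at h
  | succ f ih =>
    intro x r hx h
    have hget : PySem.List.pyGetD s (x : Int) 0 = s.getD x 0 := by simp
    by_cases hneg : s.getD x 0 < 0
    · have hr' : r = x := by
        simp only [rootGo] at h; rw [if_pos hneg] at h; exact (Option.some_inj.mp h).symm
      subst hr'
      simp only [pvFind, hget]
      rw [if_pos hneg]
      exact ⟨rfl, rfl, fun y => Or.inl rfl⟩
    · have hnn : 0 ≤ s.getD x 0 := by omega
      have hstep : rootGo s f (s.getD x 0).toNat = some r := by
        simp only [rootGo] at h; rw [if_neg hneg] at h; exact h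
      have hvlt : (s.getD x 0).toNat < s.length := hr x hx hnn
      have hcast : s.getD x 0 = (((s.getD x 0).toNat : Nat) : Int) := by omega
      obtain ⟨h2, hlen, hpw⟩ := ih (s.getD x 0).toNat r hvlt hstep
      have hrootx : Rooted s x r := ⟨f + 1, h⟩
      have hrlt : r < s.length := rootGo_lt hr hx h
      constructor
      · simp only [pvFind, hget]; rw [if_neg hneg, hcast]; simpa using h2
      constructor
      · simp only [pvFind, hget]; rw [if_neg hneg, hcast]
        simp only [PySem.List.pySetD_natCast]
        rw [List.length_set, hlen]
      · intro y
        simp only [pvFind, hget]; rw [if_neg hneg, hcast]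
        simp only [PySem.List.pySetD_natCast]
        by_cases hyx : x = y
        · subst hyx
          right
          refine ⟨hnn, r, hrootx, hrlt, ?_⟩
          rw [getD_set, if_pos ⟨rfl, by omega⟩, h2]
        · rw [getD_set, if_neg (by tauto)]
          exact hpw y

theorem rootGo_pointwise {s t : List Int}
    (h : ∀ y, t.getD y 0 = s.getD y 0 ∨
      (0 ≤ s.getD y 0 ∧ ∃ q, Rooted s y q ∧ q < s.length ∧ t.getD y 0 = (q : Int))) :
    ∀ f y r, rootGo s f y = some r → rootGo t f y = some r := by
  intro f
  induction f with
  | zero => intro y r hy; simp [rootGo] at hy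
  | succ f ih =>
    intro y r hy
    by_cases hneg : s.getD y 0 < 0
    · have hr' : y = r := by
        simp only [rootGo] at hy; rw [if_pos hneg] at hy; exact Option.some_inj.mp hy
      have ht : t.getD y 0 = s.getD y 0 := by
        rcases h y with h1 | ⟨h1, _⟩
        · exact h1
        · omega
      simp only [rootGo]; rw [ht, if_pos hneg, hr']
    · have hstep : rootGo s f (s.getD y 0).toNat = some r := by
        simp only [rootGo] at hy; rw [if_neg hneg] at hy; exact hy
      have hroot : s.getD r 0 < 0 := rootGo_root hstep
      rcases h y with h1 | ⟨_, q, hq, _, hval⟩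
      · simp only [rootGo]; rw [h1, if_neg hneg]; exact ih _ _ hstep
      · have hqr : q = r := rooted_unique hq ⟨f + 1, hy⟩
        subst hqr
        have htr : t.getD q 0 = s.getD q 0 := by
          rcases h q with h1 | ⟨h1, _⟩
          · exact h1
          · omega
        simp only [rootGo]
        rw [hval, if_neg (by omega)]
        have hcast : ((q : Int)).toNat = q := by omega
        rw [hcast]
        cases f with
        | zero => simp [rootGo] at hstep
        | succ f => simp only [rootGo]; rw [htr, if_pos hroot]

def NR (s : List Int) : Nat := ((Finset.range s.length).filter (fun i => 0 ≤ s.getD i 0)).card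

theorem NR_le (s : List Int) : NR s ≤ s.length :=
  le_trans (Finset.card_filter_le _ _) (by simp)

def GoodS (s : List Int) : Prop :=
  (∀ y, y < s.length → 0 ≤ s.getD y 0 → (s.getD y 0).toNat < s.length) ∧
  (∀ x, x < s.length → ∃ r, rootGo s (NR s + 1) x = some r)

def SameRoots (s t : List Int) : Prop := ∀ x r, x < s.length → (Rooted s x r ↔ Rooted t x r)

theorem sameRoots_of_pointwise {s t : List Int} (hlen : t.length = s.length) (hg : GoodS s)
    (h : ∀ y, t.getD y 0 = s.getD y 0 ∨
      (0 ≤ s.getD y 0 ∧ ∃ q, Rooted s y q ∧ q < s.length ∧ t.getD y 0 = (q : Int))) :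
    SameRoots s t := by
  intro x r hx
  constructor
  · rintro ⟨f, hf⟩; exact ⟨f, rootGo_pointwise h f x r hf⟩
  · rintro ⟨f, hf⟩
    obtain ⟨r0, hr0⟩ := hg.2 x hx
    have h1 : Rooted t x r0 := ⟨_, rootGo_pointwise h _ x r0 hr0⟩
    have : r = r0 := rooted_unique ⟨f, hf⟩ h1
    subst this
    exact ⟨_, hr0⟩

theorem signs_of_pointwise {s t : List Int}
    (h : ∀ y, t.getD y 0 = s.getD y 0 ∨
      (0 ≤ s.getD y 0 ∧ ∃ q, Rooted s y q ∧ q < s.length ∧ t.getD y 0 = (q : Int))) :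
    ∀ y, (0 ≤ t.getD y 0 ↔ 0 ≤ s.getD y 0) := by
  intro y
  rcases h y with h1 | ⟨h1, q, _, _, hval⟩
  · rw [h1]
  · rw [hval]; constructor <;> intro <;> [skip; positivity]; exact h1

theorem NR_congr {s t : List Int} (hlen : t.length = s.length)
    (h : ∀ y, (0 ≤ t.getD y 0 ↔ 0 ≤ s.getD y 0)) : NR t = NR s := by
  unfold NR
  rw [hlen]
  congr 1
  exact Finset.filter_congr (fun i _ => by simpa [List.getD] using h i)

theorem goodS_of_pointwise {s t : List Int} (hlen : t.length = s.length) (hg : GoodS s)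
    (h : ∀ y, t.getD y 0 = s.getD y 0 ∨
      (0 ≤ s.getD y 0 ∧ ∃ q, Rooted s y q ∧ q < s.length ∧ t.getD y 0 = (q : Int))) :
    GoodS t := by
  constructor
  · intro y hy hnn
    rcases h y with h1 | ⟨h1, q, _, hqlt, hval⟩
    · rw [h1]; rw [hlen] at hy ⊢; exact hg.1 y hy (by rwa [← h1])
    · rw [hval]; simpa using (hlen ▸ hqlt)
  · intro x hx
    rw [hlen] at hx
    obtain ⟨r, hr⟩ := hg.2 x hx
    refine ⟨r, ?_⟩
    rw [NR_congr hlen (signs_of_pointwise h)]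
    exact rootGo_pointwise h _ x r hr

def LinkP (s comp : List Int) : Prop :=
  ∀ x y, x < s.length → y < s.length →
    (comp.getD x 0 = comp.getD y 0 ↔ ∃ r, Rooted s x r ∧ Rooted s y r)

theorem linkP_of_sameRoots {s t comp : List Int} (hlen : t.length = s.length)
    (hsr : SameRoots s t) (hl : LinkP s comp) : LinkP t comp := by
  intro x y hx hy
  rw [hlen] at hx hy
  rw [hl x y hx hy]
  constructor
  · rintro ⟨r, h1, h2⟩; exact ⟨r, (hsr x r hx).mp h1, (hsr y r hy).mp h2⟩
  · rintro ⟨r, h1, h2⟩; exact ⟨r, (hsr x r hx).mpr h1, (hsr y r hy).mpr h2⟩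

theorem pvUnion_spec {s : List Int} {r1 r2 : Nat} (h1 : r1 < s.length) (h2 : r2 < s.length)
    (hne : r1 ≠ r2) :
    ∃ w l : Nat, ((w = r1 ∧ l = r2) ∨ (w = r2 ∧ l = r1)) ∧
      (pvUnion s (r1 : Int) (r2 : Int)).length = s.length ∧
      (pvUnion s (r1 : Int) (r2 : Int)).getD l 0 = (w : Int) ∧
      (pvUnion s (r1 : Int) (r2 : Int)).getD w 0 = s.getD r1 0 + s.getD r2 0 ∧
      (∀ y, y ≠ l → y ≠ w → (pvUnion s (r1 : Int) (r2 : Int)).getD y 0 = s.getD y 0) := by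
  have hg1 : PySem.List.pyGetD s ((r1 : Nat) : Int) 0 = s.getD r1 0 := by simp
  have hg2 : PySem.List.pyGetD s ((r2 : Nat) : Int) 0 = s.getD r2 0 := by simp
  unfold pvUnion
  by_cases hc : PySem.List.pyGetD s ((r2 : Nat) : Int) 0 < PySem.List.pyGetD s ((r1 : Nat) : Int) 0
  · refine ⟨r2, r1, Or.inr ⟨rfl, rfl⟩, ?_, ?_, ?_, ?_⟩ <;>
      rw [if_pos hc] <;>
      simp only [PySem.List.pySetD_natCast, hg1, hg2]
    · simp [List.length_set]
    · rw [getD_set, if_pos ⟨rfl, by simp [List.length_set, h1]⟩]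
    · rw [getD_set, if_neg (by simp [List.length_set]; omega),
        getD_set, if_pos ⟨rfl, h2⟩]; ring
    · intro y hyl hyw
      rw [getD_set, if_neg (by tauto), getD_set, if_neg (by tauto)]
  · refine ⟨r1, r2, Or.inl ⟨rfl, rfl⟩, ?_, ?_, ?_, ?_⟩ <;>
      rw [if_neg hc] <;>
      simp only [PySem.List.pySetD_natCast, hg1, hg2]
    · simp [List.length_set]
    · rw [getD_set, if_pos ⟨rfl, by simp [List.length_set, h2]⟩]
    · rw [getD_set, if_neg (by simp [List.length_set]; omega),
        getD_set, if_pos ⟨rfl, h1⟩]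
    · intro y hyl hyw
      rw [getD_set, if_neg (by tauto), getD_set, if_neg (by tauto)]

theorem rootGo_union {s t : List Int} {w l : Nat}
    (hw : w < s.length) (hwl : w ≠ l)
    (hsw : s.getD w 0 < 0) (hsl : s.getD l 0 < 0)
    (htl : t.getD l 0 = (w : Int)) (htw : t.getD w 0 < 0)
    (hrest : ∀ y, y ≠ l → y ≠ w → t.getD y 0 = s.getD y 0) :
    ∀ f y r, rootGo s f y = some r → rootGo t (f + 1) y = some (if r = l then w else r) := by
  intro f
  induction f with
  | zero => intro y r hy; simp [rootGo] at hy
  | succ f ih =>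
    intro y r hy
    by_cases hneg : s.getD y 0 < 0
    · have hr' : y = r := by
        simp only [rootGo] at hy; rw [if_pos hneg] at hy; exact Option.some_inj.mp hy
      subst hr'
      by_cases hyl : y = l
      · have hii : (if y = l then w else y) = w := by simp [hyl]
        rw [hii]
        simp only [rootGo]
        rw [hyl, htl, if_neg (by omega)]
        have hcast : ((w : Int)).toNat = w := by omega
        rw [hcast]
        cases f with
        | zero => simp only [rootGo]; rw [if_pos htw]
        | succ f => simp only [rootGo]; rw [if_pos htw]
      · have hii : (if y = l then w else y) = y := by simp [hyl]
        rw [hii]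
        by_cases hyw : y = w
        · simp only [rootGo]; rw [hyw, if_pos htw, ← hyw]
        · have ht : t.getD y 0 = s.getD y 0 := hrest y hyl hyw
          simp only [rootGo]; rw [ht, if_pos hneg]
    · have hstep : rootGo s f (s.getD y 0).toNat = some r := by
        simp only [rootGo] at hy; rw [if_neg hneg] at hy; exact hy
      have hyl : y ≠ l := fun hh => by rw [hh] at hneg; exact hneg hsl
      have hyw : y ≠ w := fun hh => by rw [hh] at hneg; exact hneg hsw
      have ht : t.getD y 0 = s.getD y 0 := hrest y hyl hyw
      simp only [rootGo]
      rw [ht, if_neg hneg]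
      exact ih _ _ hstep

theorem goodS_union {s t : List Int} {w l : Nat} (hlen : t.length = s.length)
    (hw : w < s.length) (hl : l < s.length) (hwl : w ≠ l)
    (hsw : s.getD w 0 < 0) (hsl : s.getD l 0 < 0)
    (htl : t.getD l 0 = (w : Int)) (htw : t.getD w 0 < 0)
    (hrest : ∀ y, y ≠ l → y ≠ w → t.getD y 0 = s.getD y 0)
    (hg : GoodS s) : GoodS t := by
  have hNR : NR t = NR s + 1 := by
    unfold NR
    rw [hlen]
    have hset : (Finset.range s.length).filter (fun i => 0 ≤ t.getD i 0) =
        insert l ((Finset.range s.length).filter (fun i => 0 ≤ s.getD i 0)) := by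
      ext i
      simp only [Finset.mem_filter, Finset.mem_insert, Finset.mem_range]
      by_cases hil : i = l
      · subst hil
        constructor
        · intro _; exact Or.inl rfl
        · intro _; exact ⟨hl, by rw [htl]; omega⟩
      · by_cases hiw : i = w
        · subst hiw
          constructor
          · rintro ⟨_, hh⟩; omega
          · rintro (hh | ⟨_, hh⟩)
            · omega
            · omega
        · rw [hrest i hil hiw]
          constructor
          · rintro ⟨ha, hb⟩; exact Or.inr ⟨ha, hb⟩
          · rintro (hh | hh)
            · omega
            · exact hh
    rw [hset, Finset.card_insert_of_notMem (by simp only [Finset.mem_filter, Finset.mem_range, not_and]; intro _; omega)]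
  constructor
  · intro y hy hnn
    rw [hlen] at hy ⊢
    by_cases hyl : y = l
    · subst hyl; rw [htl]; simpa using hw
    · by_cases hyw : y = w
      · subst hyw; omega
      · rw [hrest y hyl hyw] at hnn ⊢; exact hg.1 y hy hnn
  · intro x hx
    rw [hlen] at hx
    obtain ⟨r, hr⟩ := hg.2 x hx
    refine ⟨if r = l then w else r, ?_⟩
    rw [hNR]
    exact rootGo_union hw hwl hsw hsl htl htw hrest _ x r hr

theorem rooted_union_iff {s t : List Int} {w l : Nat}
    (hw : w < s.length) (hwl : w ≠ l)
    (hsw : s.getD w 0 < 0) (hsl : s.getD l 0 < 0)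
    (htl : t.getD l 0 = (w : Int)) (htw : t.getD w 0 < 0)
    (hrest : ∀ y, y ≠ l → y ≠ w → t.getD y 0 = s.getD y 0)
    (hg : GoodS s) :
    ∀ y r', y < s.length → (Rooted t y r' ↔ ∃ r, Rooted s y r ∧ r' = if r = l then w else r) := by
  intro y r' hy
  obtain ⟨r0, hr0⟩ := hg.2 y hy
  have hfwd : Rooted t y (if r0 = l then w else r0) :=
    ⟨_, rootGo_union hw hwl hsw hsl htl htw hrest _ y r0 hr0⟩
  constructor
  · intro h
    have : r' = if r0 = l then w else r0 := rooted_unique h hfwd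
    exact ⟨r0, ⟨_, hr0⟩, this⟩
  · rintro ⟨r, hr, rfl⟩
    obtain ⟨f, hf⟩ := hr
    exact ⟨f + 1, rootGo_union hw hwl hsw hsl htl htw hrest f y r hf⟩

theorem pvRelabel_getD {mb : List Int} (h : ∀ x ∈ mb, 0 ≤ x) (a : Int) (c : List Int) :
    (pvRelabel mb a c).length = c.length ∧
    ∀ y, (pvRelabel mb a c).getD y 0 =
      if (y : Int) ∈ mb ∧ y < c.length then a else c.getD y 0 := by
  induction mb generalizing c with
  | nil => simp [pvRelabel]
  | cons x mb ih =>
    have hx : 0 ≤ x := h x List.mem_cons_self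
    have hrest : ∀ z ∈ mb, 0 ≤ z := fun z hz => h z (List.mem_cons_of_mem _ hz)
    have hfold : pvRelabel (x :: mb) a c = pvRelabel mb a (c.set x.toNat a) := by
      simp [pvRelabel, List.foldl_cons, PySem.List.pySetD_of_nonneg c a hx]
    obtain ⟨ihl, ihp⟩ := ih hrest (c.set x.toNat a)
    rw [hfold]
    refine ⟨by rw [ihl, List.length_set], ?_⟩
    intro y
    rw [ihp y, List.length_set, getD_set]
    have hCiff : ((y : Int) ∈ x :: mb ∧ y < c.length) ↔
        (((y : Int) ∈ mb ∧ y < c.length) ∨ (x.toNat = y ∧ x.toNat < c.length)) := by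
      constructor
      · rintro ⟨hm, hy⟩
        rcases List.mem_cons.mp hm with hh | hh
        · right; constructor <;> omega
        · left; exact ⟨hh, hy⟩
      · rintro (⟨hm, hy⟩ | ⟨hxy, hxl⟩)
        · exact ⟨List.mem_cons_of_mem _ hm, hy⟩
        · have hyx : (y : Int) = x := by omega
          exact ⟨by rw [hyx]; exact List.mem_cons_self, by omega⟩
    split_ifs with h1 h2 h3 <;> tauto

theorem dict_get?_erase (d : PySem.Dict Int (List Int)) (k k' : Int) :
    (d.erase k).get? k' = if k' = k then none else d.get? k' := by
  obtain ⟨items⟩ := d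
  by_cases hkk : k' = k
  · subst hkk
    rw [if_pos rfl]
    simp only [PySem.Dict.erase, PySem.Dict.get?]
    rw [List.find?_eq_none.mpr]
    · rfl
    · intro p hp
      have := (List.mem_filter.mp hp).2
      simp at this ⊢
      omega
  · rw [if_neg hkk]
    simp only [PySem.Dict.erase, PySem.Dict.get?]
    congr 1
    induction items with
    | nil => rfl
    | cons p t iht =>
      by_cases hpk : p.1 = k
      · have : (!p.1 == k) = false := by simp [hpk]
        simp only [List.filter_cons, this, Bool.false_eq_true, if_false]
        rw [List.find?_cons_of_neg (by simp [hpk]; omega)]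
        simpa using iht
      · have : (!p.1 == k) = true := by simp [hpk]
        simp only [List.filter_cons, this, if_true]
        by_cases hpk' : p.1 = k'
        · rw [List.find?_cons_of_pos (by simp [hpk']), List.find?_cons_of_pos (by simp [hpk'])]
        · rw [List.find?_cons_of_neg (by simp [hpk']), List.find?_cons_of_neg (by simp [hpk'])]
          simpa using iht

theorem dict_getD_erase (d : PySem.Dict Int (List Int)) (k k' : Int) :
    (d.erase k).getD k' [] = if k' = k then [] else d.getD k' [] := by
  rw [PySem.Dict.getD_eq_get?_getD, dict_get?_erase]
  by_cases h : k' = k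
  · rw [if_pos h, if_pos h]; rfl
  · rw [if_neg h, if_neg h, PySem.Dict.getD_eq_get?_getD]

theorem members0_getD_nat (m : Nat) (l : Int) (d0 : PySem.Dict Int (List Int)) :
    ((List.range m).foldl (fun d k => d.insert ((k : Nat) : Int) [((k : Nat) : Int)]) d0).getD l [] =
      if 0 ≤ l ∧ l < (m : Int) then [l] else d0.getD l [] := by
  induction m with
  | zero =>
    simp only [List.range_zero, List.foldl_nil]
    rw [if_neg (by omega)]
  | succ m ih =>
    rw [List.range_succ, List.foldl_append, List.foldl_cons, List.foldl_nil,
      PySem.Dict.getD_insert, ih]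
    by_cases hl : l = (m : Int)
    · rw [if_pos hl, if_pos (by omega), hl]
    · rw [if_neg hl]
      by_cases h2 : 0 ≤ l ∧ l < (m : Int)
      · rw [if_pos h2, if_pos (by omega)]
      · rw [if_neg h2, if_neg (by omega)]

theorem members0_getD (n : Int) (l : Int) :
    (((PySem.List.pyRange 0 n 1).foldl (fun d i => d.insert i [i]) (PySem.Dict.mk [])).getD l []) =
      if 0 ≤ l ∧ l < n then [l] else [] := by
  rw [PySem.List.pyRange_one, List.foldl_map]
  simp only [zero_add]
  rw [members0_getD_nat (n - 0).toNat l (PySem.Dict.mk [])]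
  by_cases h : 0 ≤ l ∧ l < n
  · rw [if_pos h, if_pos (by omega)]
  · rw [if_neg h, if_neg (by omega)]; rfl

theorem s0_getD (m : Nat) (y : Nat) :
    (((List.range m).map (fun _ => (-1 : Int))).getD y 0) = if y < m then -1 else 0 := by
  by_cases h : y < m
  · rw [if_pos h]
    rw [List.getD_eq_getElem _ _ (by simpa using h)]
    simp
  · rw [if_neg h, List.getD_eq_default _ _ (by simpa using h)]

theorem comp0_getD (n : Int) (y : Nat) :
    ((PySem.List.pyRange 0 n 1).getD y 0) = if y < n.toNat then (y : Int) else 0 := by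
  rw [PySem.List.pyRange_one]
  by_cases h : y < n.toNat
  · rw [if_pos h]
    rw [List.getD_eq_getElem _ _ (by simp; omega)]
    simp
  · rw [if_neg h, List.getD_eq_default _ _ (by simp; omega)]

def MemInv (comp : List Int) (members : PySem.Dict Int (List Int)) : Prop :=
  ∀ l v, v ∈ members.getD l [] ↔ (0 ≤ v ∧ v.toNat < comp.length ∧ comp.getD v.toNat 0 = l)

def StInv (m : Nat) (s comp : List Int) (members : PySem.Dict Int (List Int)) : Prop :=
  s.length = m ∧ comp.length = m ∧ GoodS s ∧ LinkP s comp ∧ MemInv comp members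

theorem inv_init (n : Int) :
    StInv n.toNat ((List.range n.toNat).map (fun _ => (-1 : Int))) (PySem.List.pyRange 0 n 1)
      ((PySem.List.pyRange 0 n 1).foldl (fun d i => d.insert i [i]) (PySem.Dict.mk [])) := by
  have hslen : ((List.range n.toNat).map (fun _ => (-1 : Int))).length = n.toNat := by simp
  have hclen : (PySem.List.pyRange 0 n 1).length = n.toNat := by
    rw [PySem.List.length_pyRange_one]; simp
  have hneg : ∀ y, y < n.toNat → ((List.range n.toNat).map (fun _ => (-1 : Int))).getD y 0 = -1 := by
    intro y hy; rw [s0_getD, if_pos hy]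
  have hrooted : ∀ x r, x < n.toNat →
      (Rooted ((List.range n.toNat).map (fun _ => (-1 : Int))) x r ↔ r = x) := by
    intro x r hx
    constructor
    · intro h
      exact (rooted_unique h (rooted_self (by rw [hneg x hx]; omega))).symm ▸ rfl
    · rintro rfl
      exact rooted_self (by rw [hneg r hx]; omega)
  refine ⟨hslen, hclen, ⟨?_, ?_⟩, ?_, ?_⟩
  · intro y hy hnn
    rw [hslen] at hy
    rw [hneg y hy] at hnn
    omega
  · intro x hx
    rw [hslen] at hx
    refine ⟨x, ?_⟩
    simp only [rootGo]
    rw [if_pos (by rw [hneg x hx]; omega)]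
  · intro x y hx hy
    rw [hslen] at hx hy
    rw [comp0_getD, comp0_getD, if_pos hx, if_pos hy]
    constructor
    · intro h
      have hxy : x = y := by omega
      subst hxy
      exact ⟨x, (hrooted x x hx).mpr rfl, (hrooted x x hx).mpr rfl⟩
    · rintro ⟨r, h1, h2⟩
      have e1 := (hrooted x r hx).mp h1
      have e2 := (hrooted y r hy).mp h2
      omega
  · intro l v
    rw [members0_getD]
    constructor
    · intro hv
      by_cases hc : 0 ≤ l ∧ l < n
      · rw [if_pos hc] at hv
        have hvl : v = l := by simpa using hv
        subst hvl
        refine ⟨hc.1, by rw [hclen]; omega, ?_⟩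
        rw [comp0_getD, if_pos (by omega)]
        omega
      · rw [if_neg hc] at hv
        simp at hv
    · rintro ⟨h0, hlt, hval⟩
      rw [hclen] at hlt
      rw [comp0_getD, if_pos hlt] at hval
      have : l = v := by omega
      subst this
      rw [if_pos (by omega)]
      simp

theorem card_filter_range (m : Nat) (p : Nat → Prop) [DecidablePred p] :
    ((Finset.range m).filter p).card = (List.range m).countP (fun i => decide (p i)) := by
  simp [Finset.range, Finset.filter, Finset.card, Multiset.range]
  rw [List.countP_eq_length_filter]

theorem count_eq {m : Nat} {s comp : List Int} (hs : s.length = m) (hcomp : comp.length = m)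
    (hg : GoodS s) (hl : LinkP s comp) :
    ((List.range m).countP (fun i => decide (s.getD i 0 < 0)) : Int) = ((PySem.Set.ofList comp).length : Int) := by
  have hr := hg.1
  have hroots : ∀ x, x < m → ∃ r, Rooted s x r ∧ r < m ∧ s.getD r 0 < 0 := by
    intro x hx
    obtain ⟨r, hr0⟩ := hg.2 x (by omega)
    exact ⟨r, ⟨_, hr0⟩, by rw [← hs]; exact rootGo_lt hg.1 (by omega) hr0, rootGo_root hr0⟩
  have hself : ∀ r, s.getD r 0 < 0 → Rooted s r r := fun r h => rooted_self h
  -- image over all indices = image over root indices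
  have himg : (Finset.range m).image (fun i => comp.getD i 0) =
      ((Finset.range m).filter (fun i => s.getD i 0 < 0)).image (fun i => comp.getD i 0) := by
    apply Finset.Subset.antisymm
    · intro z hz
      obtain ⟨i, hi, hiz⟩ := Finset.mem_image.mp hz
      have him : i < m := Finset.mem_range.mp hi
      obtain ⟨r, hrr, hrm, hrneg⟩ := hroots i him
      refine Finset.mem_image.mpr ⟨r, Finset.mem_filter.mpr ⟨Finset.mem_range.mpr hrm, hrneg⟩, ?_⟩
      rw [← hiz]
      exact ((hl r i (by omega) (by omega)).mpr ⟨r, hself r hrneg, hrr⟩)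
    · exact Finset.image_subset_image (Finset.filter_subset _ _)
  have hinj : Set.InjOn (fun i => comp.getD i 0)
      ((Finset.range m).filter (fun i => s.getD i 0 < 0)) := by
    intro r1 hr1 r2 hr2 heq
    simp only [Finset.coe_filter, Set.mem_setOf_eq, Finset.mem_range] at hr1 hr2
    obtain ⟨r, ha, hb⟩ := (hl r1 r2 (by omega) (by omega)).mp heq
    have e1 := rooted_unique ha (hself r1 hr1.2)
    have e2 := rooted_unique hb (hself r2 hr2.2)
    omega
  have hcard : ((Finset.range m).filter (fun i => s.getD i 0 < 0)).card =
      ((Finset.range m).image (fun i => comp.getD i 0)).card := by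
    rw [himg, Finset.card_image_of_injOn hinj]
  have htof : comp.toFinset = (Finset.range m).image (fun i => comp.getD i 0) := by
    ext v
    rw [List.mem_toFinset, Finset.mem_image]
    constructor
    · intro hv
      obtain ⟨i, hi, hiv⟩ := List.mem_iff_getElem.mp hv
      have him : i < m := by rw [hcomp] at hi; omega
      refine ⟨i, Finset.mem_range.mpr him, ?_⟩
      rw [List.getD_eq_getElem _ _ hi, hiv]
    · rintro ⟨i, hi, hiv⟩
      have him : i < m := Finset.mem_range.mp hi
      rw [← hiv, List.getD_eq_getElem _ _ (by rw [hcomp]; omega)]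
      exact List.getElem_mem _
  have hofl : (PySem.Set.ofList comp).length = comp.toFinset.card := by
    have hnd := PySem.Set.nodup_ofList (xs := comp)
    have hmem : (PySem.Set.ofList comp).toFinset = comp.toFinset := by
      ext v
      rw [List.mem_toFinset, List.mem_toFinset, PySem.Set.mem_ofList]
    rw [← hmem, List.toFinset_card_of_nodup hnd]
  rw [← card_filter_range m (fun i => s.getD i 0 < 0)] at *
  rw [hofl, htof, ← hcard]

theorem merge_inv {m : Nat} {s2 comp : List Int} {members : PySem.Dict Int (List Int)}
    {t : List Int} {w l ra rb : Nat} {a b : Int}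
    (hlen2 : s2.length = m) (hcomp : comp.length = m)
    (hg2 : GoodS s2) (hl2 : LinkP s2 comp) (hm : MemInv comp members)
    (hw : w < m) (hli : l < m) (hwl : w ≠ l)
    (hsw : s2.getD w 0 < 0) (hsl : s2.getD l 0 < 0)
    (hlen3 : t.length = s2.length) (htl : t.getD l 0 = (w : Int)) (htw : t.getD w 0 < 0)
    (hrest : ∀ y, y ≠ l → y ≠ w → t.getD y 0 = s2.getD y 0)
    (hABroots : (ra = w ∧ rb = l) ∨ (ra = l ∧ rb = w))
    (hab : a ≠ b)
    (hLa : ∀ x, x < m → (comp.getD x 0 = a ↔ Rooted s2 x ra))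
    (hLb : ∀ x, x < m → (comp.getD x 0 = b ↔ Rooted s2 x rb)) :
    StInv m t (pvRelabel (members.getD b []) a comp)
      ((members.insert a (members.getD a [] ++ members.getD b [])).erase b) := by
  have hmb_mem : ∀ v : Int, v ∈ members.getD b [] ↔ (0 ≤ v ∧ v.toNat < m ∧ comp.getD v.toNat 0 = b) := by
    intro v; rw [hm b v, hcomp]
  have hma_mem : ∀ v : Int, v ∈ members.getD a [] ↔ (0 ≤ v ∧ v.toNat < m ∧ comp.getD v.toNat 0 = a) := by
    intro v; rw [hm a v, hcomp]
  have hmb_nonneg : ∀ x ∈ members.getD b [], (0 : Int) ≤ x := fun x hx => ((hmb_mem x).mp hx).1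
  obtain ⟨hRlen, hRpt⟩ := pvRelabel_getD hmb_nonneg a comp
  have hRel : ∀ y, y < m → (pvRelabel (members.getD b []) a comp).getD y 0 =
      if comp.getD y 0 = b then a else comp.getD y 0 := by
    intro y hy
    rw [hRpt y]
    by_cases hc : comp.getD y 0 = b
    · rw [if_pos hc, if_pos ⟨(hmb_mem _).mpr ⟨by omega, by simpa using hy, by simpa using hc⟩, by omega⟩]
    · rw [if_neg hc, if_neg (by
        rintro ⟨hmem, _⟩
        exact hc (by simpa using ((hmb_mem _).mp hmem).2.2))]
  have hroot : ∀ x, x < m → ∃ rx, Rooted s2 x rx ∧ rx < m ∧ s2.getD rx 0 < 0 ∧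
      (∀ q, Rooted s2 x q → q = rx) := by
    intro x hx
    obtain ⟨r, hr⟩ := hg2.2 x (by omega)
    exact ⟨r, ⟨_, hr⟩, by rw [← hlen2]; exact rootGo_lt hg2.1 (by omega) hr, rootGo_root hr,
      fun q hq => rooted_unique hq ⟨_, hr⟩⟩
  have hT : ∀ x, x < m → ∀ rx, Rooted s2 x rx → (∀ q, Rooted s2 x q → q = rx) →
      ∀ q', (Rooted t x q' ↔ q' = if rx = l then w else rx) := by
    intro x hx rx hrx huniq q'
    rw [rooted_union_iff (by omega) hwl hsw hsl htl htw hrest hg2 x q' (by omega)]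
    constructor
    · rintro ⟨r, hr, rfl⟩
      rw [huniq r hr]
    · rintro rfl
      exact ⟨rx, hrx, rfl⟩
  refine ⟨by rw [hlen3, hlen2], by rw [hRlen, hcomp], ?_, ?_, ?_⟩
  · exact goodS_union hlen3 (by omega) (by omega) hwl hsw hsl htl htw hrest hg2
  · -- LinkP
    intro x y hx hy
    rw [hlen3, hlen2] at hx hy
    obtain ⟨rx, hrx, hrxm, hrxneg, hrxu⟩ := hroot x hx
    obtain ⟨ry, hry, hrym, hryneg, hryu⟩ := hroot y hy
    have hRHS : (∃ r', Rooted t x r' ∧ Rooted t y r') ↔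
        ((if rx = l then w else rx) = (if ry = l then w else ry)) := by
      constructor
      · rintro ⟨r', h1, h2⟩
        rw [← (hT x hx rx hrx hrxu r').mp h1, ← (hT y hy ry hry hryu r').mp h2]
      · intro h
        exact ⟨_, (hT x hx rx hrx hrxu _).mpr rfl, (hT y hy ry hry hryu _).mpr h⟩
    rw [hRHS, hRel x hx, hRel y hy]
    have hx_a : comp.getD x 0 = a ↔ rx = ra := by
      rw [hLa x hx]
      exact ⟨fun h => hrxu ra h ▸ (hrxu ra h).symm ▸ rfl, fun h => h ▸ hrx⟩
    have hx_b : comp.getD x 0 = b ↔ rx = rb := by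
      rw [hLb x hx]
      exact ⟨fun h => (hrxu rb h).symm, fun h => h ▸ hrx⟩
    have hy_a : comp.getD y 0 = a ↔ ry = ra := by
      rw [hLa y hy]
      exact ⟨fun h => (hryu ra h).symm, fun h => h ▸ hry⟩
    have hy_b : comp.getD y 0 = b ↔ ry = rb := by
      rw [hLb y hy]
      exact ⟨fun h => (hryu rb h).symm, fun h => h ▸ hry⟩
    have hS : comp.getD x 0 = comp.getD y 0 ↔ rx = ry := by
      rw [hl2 x y (by omega) (by omega)]
      constructor
      · rintro ⟨r, h1, h2⟩
        rw [← hrxu r h1, ← hryu r h2]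
      · intro h
        exact ⟨rx, hrx, h ▸ hry⟩
    by_cases cx : comp.getD x 0 = b <;> by_cases cy : comp.getD y 0 = b
    · rw [if_pos cx, if_pos cy]
      have e1 := hx_b.mp cx
      have e2 := hy_b.mp cy
      rcases hABroots with ⟨h1, h2⟩ | ⟨h1, h2⟩ <;> simp only [true_iff] <;>
        split_ifs <;> omega
    · rw [if_pos cx, if_neg cy]
      have e1 := hx_b.mp cx
      have e2 : ¬ (ry = rb) := fun h => cy (hy_b.mpr h)
      rw [eq_comm, hy_a]
      rcases hABroots with ⟨h1, h2⟩ | ⟨h1, h2⟩ <;> split_ifs <;> omega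
    · rw [if_neg cx, if_pos cy]
      have e1 : ¬ (rx = rb) := fun h => cx (hx_b.mpr h)
      have e2 := hy_b.mp cy
      rw [hx_a]
      rcases hABroots with ⟨h1, h2⟩ | ⟨h1, h2⟩ <;> split_ifs <;> omega
    · rw [if_neg cx, if_neg cy]
      have e1 : ¬ (rx = rb) := fun h => cx (hx_b.mpr h)
      have e2 : ¬ (ry = rb) := fun h => cy (hy_b.mpr h)
      rw [hS]
      rcases hABroots with ⟨h1, h2⟩ | ⟨h1, h2⟩ <;> split_ifs <;> omega
  · -- MemInv
    intro l' v
    rw [dict_getD_erase]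
    by_cases hlb : l' = b
    · rw [if_pos hlb]
      simp only [List.not_mem_nil, false_iff]
      rintro ⟨h0, htn, hval⟩
      rw [hRlen, hcomp] at htn
      rw [hRel _ htn] at hval
      subst hlb
      split_ifs at hval with hc
      · exact hab hval
      · exact hc hval
    · rw [if_neg hlb, PySem.Dict.getD_insert]
      by_cases hla : l' = a
      · rw [if_pos hla]
        subst hla
        rw [List.mem_append]
        constructor
        · intro hv
          rcases hv with hv | hv
          · obtain ⟨h0, htn, hval⟩ := (hma_mem v).mp hv
            refine ⟨h0, by rw [hRlen, hcomp]; omega, ?_⟩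
            rw [hRel _ htn, if_neg (by rw [hval]; omega), hval]
          · obtain ⟨h0, htn, hval⟩ := (hmb_mem v).mp hv
            exact ⟨h0, by rw [hRlen, hcomp]; omega, by rw [hRel _ htn, if_pos hval]⟩
        · rintro ⟨h0, htn, hval⟩
          rw [hRlen, hcomp] at htn
          rw [hRel _ htn] at hval
          split_ifs at hval with hc
          · exact Or.inr ((hmb_mem v).mpr ⟨h0, htn, hc⟩)
          · exact Or.inl ((hma_mem v).mpr ⟨h0, htn, hval⟩)
      · rw [if_neg hla]
        rw [hm l' v, hcomp]
        constructor
        · rintro ⟨h0, htn, hval⟩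
          refine ⟨h0, by rw [hRlen, hcomp]; omega, ?_⟩
          rw [hRel _ htn, if_neg (by rw [hval]; omega), hval]
        · rintro ⟨h0, htn, hval⟩
          rw [hRlen, hcomp] at htn
          rw [hRel _ htn] at hval
          split_ifs at hval with hc
          · exact absurd hval.symm hla
          · exact ⟨h0, htn, hval⟩

theorem inv_step {m : Nat} {s comp : List Int} {members : PySem.Dict Int (List Int)}
    (hinv : StInv m s comp members) {c : List Int} {i0 i1 : Nat}
    (h0 : i0 < m) (h1 : i1 < m)
    (hE0 : PySem.List.pyGetD c 0 0 = (i0 : Int))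
    (hE1 : PySem.List.pyGetD c 1 0 = (i1 : Int)) :
    StInv m (pvLoopA s c) (pvStepB (comp, members) c).1 (pvStepB (comp, members) c).2 := by
  obtain ⟨hs, hcomp, hg, hl, hm⟩ := hinv
  obtain ⟨r1, hr1go⟩ := hg.2 i0 (by omega)
  have hr1go' : rootGo s (s.length + 1) i0 = some r1 := rootGo_mono hr1go (by have := NR_le s; omega)
  obtain ⟨f2a, flen1, fpw1⟩ := pvFind_spec hg.1 (s.length + 1) i0 r1 (by omega) hr1go'
  set s1 := (pvFind (s.length + 1) s (i0 : Int)).1 with hs1def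
  have hg1 : GoodS s1 := goodS_of_pointwise flen1 hg fpw1
  have hsr1 : SameRoots s s1 := sameRoots_of_pointwise flen1 hg fpw1
  have hsign1 : ∀ y, (0 ≤ s1.getD y 0 ↔ 0 ≤ s.getD y 0) := signs_of_pointwise fpw1
  obtain ⟨r2, hr2go⟩ := hg1.2 i1 (by rw [flen1]; omega)
  have hr2go' : rootGo s1 (s1.length + 1) i1 = some r2 := rootGo_mono hr2go (by have := NR_le s1; omega)
  obtain ⟨f2b, flen2, fpw2⟩ := pvFind_spec hg1.1 (s1.length + 1) i1 r2 (by rw [flen1]; omega) hr2go'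
  set s2 := (pvFind (s1.length + 1) s1 (i1 : Int)).1 with hs2def
  have hg2 : GoodS s2 := goodS_of_pointwise flen2 hg1 fpw2
  have hsr2 : SameRoots s1 s2 := sameRoots_of_pointwise flen2 hg1 fpw2
  have hsign2 : ∀ y, (0 ≤ s2.getD y 0 ↔ 0 ≤ s1.getD y 0) := signs_of_pointwise fpw2
  have hlen2 : s2.length = m := by rw [flen2, flen1, hs]
  have hsr02 : SameRoots s s2 := fun x r hx => (hsr1 x r hx).trans (hsr2 x r (by rw [flen1]; omega))
  have hRs1 : Rooted s i0 r1 := ⟨_, hr1go⟩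
  have hRs2 : Rooted s i1 r2 := (hsr1 i1 r2 (by omega)).mpr ⟨_, hr2go⟩
  have hr1m : r1 < m := by rw [← hs]; exact rootGo_lt hg.1 (by omega) hr1go
  have hr2m : r2 < m := by
    have := rootGo_lt hg1.1 (x := i1) (by rw [flen1]; omega) hr2go
    rw [flen1, hs] at this; exact this
  have hneg1 : s.getD r1 0 < 0 := rootGo_root hr1go
  have hneg2 : s1.getD r2 0 < 0 := rootGo_root hr2go
  have hneg1' : s2.getD r1 0 < 0 := by
    have a1 := hsign1 r1; have a2 := hsign2 r1
    have b1 := (fpw1 r1); have b2 := (fpw2 r1)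
    rcases b1 with b1 | ⟨b1, _⟩
    · rcases b2 with b2 | ⟨b2, _⟩
      · omega
      · rw [b1] at b2; omega
    · omega
  have hneg2' : s2.getD r2 0 < 0 := by
    rcases fpw2 r2 with b2 | ⟨b2, _⟩
    · omega
    · omega
  have hl2 : LinkP s2 comp := linkP_of_sameRoots (by rw [flen2, flen1]) hsr02 hl
  have hR1s2 : Rooted s2 i0 r1 := (hsr02 i0 r1 (by omega)).mp hRs1
  have hR2s2 : Rooted s2 i1 r2 := (hsr02 i1 r2 (by omega)).mp hRs2
  have hLa2 : ∀ x, x < m → (comp.getD x 0 = comp.getD i0 0 ↔ Rooted s2 x r1) := by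
    intro x hx
    rw [hl2 x i0 (by omega) (by omega)]
    constructor
    · rintro ⟨r, hxr, hi0r⟩
      rw [← rooted_unique hi0r hR1s2]; exact hxr
    · intro hxr; exact ⟨r1, hxr, hR1s2⟩
  have hLb2 : ∀ x, x < m → (comp.getD x 0 = comp.getD i1 0 ↔ Rooted s2 x r2) := by
    intro x hx
    rw [hl2 x i1 (by omega) (by omega)]
    constructor
    · rintro ⟨r, hxr, hi1r⟩
      rw [← rooted_unique hi1r hR2s2]; exact hxr
    · intro hxr; exact ⟨r2, hxr, hR2s2⟩
  have hlabiff : comp.getD i0 0 = comp.getD i1 0 ↔ r1 = r2 := by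
    rw [hLb2 i0 (by omega)]
    constructor
    · intro h; exact rooted_unique hR1s2 h
    · intro h; exact h ▸ hR1s2
  have hA : pvLoopA s c =
      (if (pvFind (s.length + 1) s (i0 : Int)).2 ≠ (pvFind (s1.length + 1) s1 (i1 : Int)).2 then
        pvUnion (pvFind (s1.length + 1) s1 (i1 : Int)).1 (pvFind (s.length + 1) s (i0 : Int)).2
          (pvFind (s1.length + 1) s1 (i1 : Int)).2
      else (pvFind (s1.length + 1) s1 (i1 : Int)).1) := by
    simp only [pvLoopA, hE0, hE1, hs1def]
  have hB : pvStepB (comp, members) c =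
      (if comp.getD i0 0 ≠ comp.getD i1 0 then
        ((fun ab : Int × Int =>
          (pvRelabel (members.getD ab.2 []) ab.1 comp,
           (members.insert ab.1 (members.getD ab.1 [] ++ members.getD ab.2 [])).erase ab.2))
          (if (members.getD (comp.getD i0 0) []).length < (members.getD (comp.getD i1 0) []).length
            then (comp.getD i1 0, comp.getD i0 0) else (comp.getD i0 0, comp.getD i1 0)))
      else (comp, members)) := by
    simp only [pvStepB, hE0, hE1, PySem.List.pyGetD_natCast]
  by_cases hc : r1 = r2
  · have hlab : comp.getD i0 0 = comp.getD i1 0 := hlabiff.mpr hc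
    rw [hA, hB, if_neg (by rw [f2a, f2b]; simp [hc]), if_neg (by simpa using hlab)]
    exact ⟨hlen2, hcomp, hg2, hl2, hm⟩
  · have hlab : comp.getD i0 0 ≠ comp.getD i1 0 := fun h => hc (hlabiff.mp h)
    rw [hA, hB, if_pos (by rw [f2a, f2b]; simpa using fun h => hc (by exact_mod_cast h)),
      if_pos hlab, f2a, f2b]
    obtain ⟨w, l, hwl_disj, hulen, hutl, hutw, hurest⟩ :=
      pvUnion_spec (s := s2) (r1 := r1) (r2 := r2) (by omega) (by omega) hc
    have hwm : w < m := by rcases hwl_disj with ⟨rfl, rfl⟩ | ⟨rfl, rfl⟩ <;> omega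
    have hlm : l < m := by rcases hwl_disj with ⟨rfl, rfl⟩ | ⟨rfl, rfl⟩ <;> omega
    have hwl : w ≠ l := by rcases hwl_disj with ⟨rfl, rfl⟩ | ⟨rfl, rfl⟩ <;> omega
    have hsw : s2.getD w 0 < 0 := by rcases hwl_disj with ⟨rfl, rfl⟩ | ⟨rfl, rfl⟩ <;> assumption
    have hsl : s2.getD l 0 < 0 := by rcases hwl_disj with ⟨rfl, rfl⟩ | ⟨rfl, rfl⟩ <;> assumption
    have hutw' : (pvUnion s2 (r1 : Int) (r2 : Int)).getD w 0 < 0 := by rw [hutw]; omega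
    by_cases hswap : (members.getD (comp.getD i0 0) []).length < (members.getD (comp.getD i1 0) []).length
    · rw [if_pos hswap]
      exact merge_inv hlen2 hcomp hg2 hl2 hm hwm hlm hwl hsw hsl (by rw [hulen, hlen2]) hutl hutw'
        hurest (by rcases hwl_disj with ⟨rfl, rfl⟩ | ⟨rfl, rfl⟩ <;> [exact Or.inr ⟨rfl, rfl⟩; exact Or.inl ⟨rfl, rfl⟩])
        (fun h => hlab h.symm) hLb2 hLa2
    · rw [if_neg hswap]
      exact merge_inv hlen2 hcomp hg2 hl2 hm hwm hlm hwl hsw hsl (by rw [hulen, hlen2]) hutl hutw'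
        hurest (by rcases hwl_disj with ⟨rfl, rfl⟩ | ⟨rfl, rfl⟩ <;> [exact Or.inl ⟨rfl, rfl⟩; exact Or.inr ⟨rfl, rfl⟩])
        hlab hLa2 hLb2

theorem inv_fold {m : Nat} (cs : List (List Int)) : ∀ {s comp : List Int}
    {members : PySem.Dict Int (List Int)}, StInv m s comp members →
    (∀ c ∈ cs, 0 ≤ c.getD 0 0 ∧ c.getD 0 0 < (m : Int) ∧ 0 ≤ c.getD 1 0 ∧ c.getD 1 0 < (m : Int)) →
    StInv m (cs.foldl pvLoopA s) (cs.foldl pvStepB (comp, members)).1 (cs.foldl pvStepB (comp, members)).2 := by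
  induction cs with
  | nil => intro s comp members hinv _; exact hinv
  | cons c cs ih =>
    intro s comp members hinv hcs
    obtain ⟨hv0, hv1, hv2, hv3⟩ := hcs c List.mem_cons_self
    have hE0 : PySem.List.pyGetD c 0 0 = (((c.getD 0 0).toNat : Nat) : Int) := by
      rw [PySem.List.pyGetD_zero]; omega
    have hE1 : PySem.List.pyGetD c 1 0 = (((c.getD 1 0).toNat : Nat) : Int) := by
      rw [PySem.List.pyGetD_ofNat' c 1 0]; omega
    have hstep := inv_step hinv (c := c) (by omega) (by omega) hE0 hE1
    rw [List.foldl_cons, List.foldl_cons]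
    have := ih hstep (fun c' hc' => hcs c' (List.mem_cons_of_mem _ hc'))
    convert this using 2

-- ===== VERDICT (by name: the statement is the Claim_ definition above) =====
theorem makeConnected_spec : Claim_equal_makeConnected := by
  unfold Claim_equal_makeConnected
  intro n connections _ hpre
  unfold Spec_makeConnected
  by_cases hguard : (connections.length : Int) < n - 1
  · simp only [makeConnected, makeConnected_alt]
    rw [if_pos hguard, if_pos hguard]
  · have hval : ∀ c ∈ connections, 0 ≤ c.getD 0 0 ∧ c.getD 0 0 < (n.toNat : Int) ∧
        0 ≤ c.getD 1 0 ∧ c.getD 1 0 < (n.toNat : Int) := by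
      rcases hpre with h | h
      · exact absurd h hguard
      · intro c hc
        obtain ⟨_, h1, h2, h3, h4⟩ := h c hc
        exact ⟨h1, by omega, h3, by omega⟩
    have hinv := inv_fold connections (inv_init n) hval
    obtain ⟨hsl, hcl, hgF, hlF, _⟩ := hinv
    simp only [makeConnected, makeConnected_alt]
    rw [if_neg hguard, if_neg hguard]
    rw [PySem.List.foldl_ite_add_one]
    have hcnt : ((PySem.List.pyRange 0 n 1).countP
        (fun i => decide (PySem.List.pyGetD (connections.foldl pvLoopA ((List.range n.toNat).map (fun _ => (-1 : Int)))) i 0 < 0)))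
        = (List.range n.toNat).countP (fun i =>
            decide ((connections.foldl pvLoopA ((List.range n.toNat).map (fun _ => (-1 : Int)))).getD i 0 < 0)) := by
      rw [PySem.List.pyRange_one, List.countP_map]
      simp only [Function.comp_def, zero_add, sub_zero, PySem.List.pyGetD_natCast]
    rw [hcnt]
    have := count_eq hsl hcl hgF hlF
    omega
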